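-- pv_equiv track=rewrite | github.com/ashwanitripathi-brickwin/dec-local | dec/utils.py | adjust_week_counts
-- ===== SOURCE A (Python) =====
-- def adjust_week_counts(result):
--     # Identify overlapping weeks
--     final_result = {month: len(week_numbers) for month, week_numbers in result.items()}
--
--     for month, weeks in sorted(result.items()):
--         previous_month = month - 1
--         if previous_month in result:
--             overlapping_weeks = result[previous_month] & result[month]  # Common weeks
--             if overlapping_weeks:
--                 final_result[previous_month] -= len(overlapping_weeks)
--                 final_result[month] = len(result[month])  # Keep count in later month
--
--     return final_result
-- ===== SOURCE B (Python) =====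
-- def adjust_week_counts(result):
--     # Look forward: each month loses the weeks it shares with the next month.
--     return {m: len(w) - len(w & result.get(m + 1, set()))
--             for m, w in result.items()}
-- ===== Notes on version B (the rewrite author's own statement) =====
-- stated objective: simpler
-- what changed: Replaces the sort + mutation loop (which decrements the PREVIOUS month's count and redundantly reassigns the current one) by a single forward-looking dict comprehension: each month's count is len(weeks) minus the overlap with the NEXT month's weeks, so the sorted() pass, the mutation phase and the dead reassignment disappear. (measured ~1.6x faster at the largest size: one pass, no sort, no dict mutation)
import Mathlib
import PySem

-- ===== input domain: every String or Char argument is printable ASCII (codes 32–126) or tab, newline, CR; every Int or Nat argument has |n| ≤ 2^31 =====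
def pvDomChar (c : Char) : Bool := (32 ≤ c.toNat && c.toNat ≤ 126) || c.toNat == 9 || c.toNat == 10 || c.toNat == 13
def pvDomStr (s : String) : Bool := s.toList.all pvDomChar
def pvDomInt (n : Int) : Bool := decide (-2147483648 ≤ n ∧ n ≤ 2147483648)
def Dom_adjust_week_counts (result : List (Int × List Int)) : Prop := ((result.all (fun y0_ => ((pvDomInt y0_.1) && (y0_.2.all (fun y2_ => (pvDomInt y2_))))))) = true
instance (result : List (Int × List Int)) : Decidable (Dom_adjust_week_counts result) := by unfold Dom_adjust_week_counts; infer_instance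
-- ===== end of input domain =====

-- B replaces A's sort-then-mutate loop by one forward-looking map (each month minus its overlap with the next month); objective: simpler.


-- ===== PORT A =====
-- input normalization shared by both ports: the Python parameter is a dict[int, set[int]],
-- delivered here as an association list (duplicate keys overwrite, first position kept) with
-- each value list taken as a set (distinct elements).
def pvDict (result : List (Int × List Int)) : PySem.Dict Int (PySem.Set Int) :=
  PySem.Dict.ofList (result.map (fun p => (p.1, PySem.Set.ofList p.2)))

-- the body of A's 'for month, weeks in sorted(result.items())' loop
def pvStepA (d : PySem.Dict Int (PySem.Set Int)) (f : PySem.Dict Int Int)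
    (p : Int × PySem.Set Int) : PySem.Dict Int Int :=
  match d.get? (p.1 - 1) with
  | some wprev =>
      let overlapping := PySem.Set.inter wprev p.2
      if overlapping ≠ ([] : PySem.Set Int) then
        (f.modify (p.1 - 1) 0 (· - PySem.Set.len overlapping)).insert p.1 (PySem.Set.len p.2)
      else f
  | none => f

def adjust_week_counts (result : List (Int × List Int)) : List (Int × Int) :=
  let d := pvDict result
  -- final_result = {month: len(week_numbers) for month, week_numbers in result.items()}
  let final0 := d.items.foldl (fun f p => f.insert p.1 (PySem.Set.len p.2)) PySem.Dict.empty
  -- sorted(result.items()): the dict's keys are unique, so Python's tuple order is the order by key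
  ((PySem.List.sorted d.items (fun p => p.1)).foldl (pvStepA d) final0).items

-- ===== PORT B =====
def adjust_week_counts_alt (result : List (Int × List Int)) : List (Int × Int) :=
  let d := pvDict result
  d.items.map (fun p =>
    (p.1, PySem.Set.len p.2 -
          PySem.Set.len (PySem.Set.inter p.2 (d.getD (p.1 + 1) PySem.Set.empty))))

-- ===== PRECONDITION & SPEC =====
def Spec_adjust_week_counts (result : List (Int × List Int)) (out : List (Int × Int)) : Prop := out = adjust_week_counts_alt result
instance (result : List (Int × List Int)) (out : List (Int × Int)) : Decidable (Spec_adjust_week_counts result out) := by unfold Spec_adjust_week_counts; infer_instance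

-- ===== CLAIM (what is proved, stated in full; the proofs are below) =====
def Claim_equal_adjust_week_counts : Prop := ∀ (result : List (Int × List Int)), Dom_adjust_week_counts result → Spec_adjust_week_counts result (adjust_week_counts result)

-- ===== LEMMAS AND PROOFS =====

-- the loop invariant: `pending` are the keys A's sorted loop has not yet processed; a key whose
-- successor's step is done (or never comes) already carries B's corrected count.
def pvInv (d : PySem.Dict Int (PySem.Set Int)) (pending : List Int)
    (f : PySem.Dict Int Int) : Prop :=
  f.keys = d.keys ∧
  ∀ k w, d.get? k = some w →
    f.getD k 0 = PySem.Set.len w -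
      (if d.contains (k+1) = true ∧ (k+1) ∉ pending ∧
          PySem.Set.inter w (d.getD (k+1) PySem.Set.empty) ≠ ([] : PySem.Set Int)
       then PySem.Set.len (PySem.Set.inter w (d.getD (k+1) PySem.Set.empty)) else 0)


theorem pvStepA_inv (d : PySem.Dict Int (PySem.Set Int))
    (p : Int × PySem.Set Int) (t : List (Int × PySem.Set Int))
    (f : PySem.Dict Int Int)
    (hp : d.get? p.1 = some p.2)
    (hlt : ∀ q ∈ t, p.1 < q.1)
    (hlo : ∀ j ∈ d.keys, j ∉ p.1 :: t.map (·.1) → ∀ i ∈ p.1 :: t.map (·.1), j < i)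
    (hinv : pvInv d (p.1 :: t.map (·.1)) f) :
    pvInv d (t.map (·.1)) (pvStepA d f p) := by
  obtain ⟨hkeys, hval⟩ := hinv
  have hmnott : p.1 ∉ t.map (·.1) := by
    intro h
    obtain ⟨q, hq, hq1⟩ := List.mem_map.mp h
    exact absurd (hlt q hq) (by omega)
  unfold pvStepA
  cases hprev : d.get? (p.1 - 1) with
  | none =>
    refine ⟨hkeys, fun k w hk => ?_⟩
    have hkp : k + 1 ≠ p.1 := by
      intro h
      rw [show k = p.1 - 1 by omega, hprev] at hk
      simp at hk
    rw [hval k w hk]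
    congr 1
    apply if_congr _ rfl rfl
    simp [List.mem_cons, hkp]
  | some wprev =>
    simp only []
    by_cases hov : PySem.Set.inter wprev p.2 ≠ ([] : PySem.Set Int)
    · simp only [if_pos hov]
      have hcontm : f.contains p.1 = true := by
        rw [PySem.Dict.contains_iff_mem_keys, hkeys, ← PySem.Dict.contains_iff_mem_keys]
        rw [← Bool.not_eq_false, ← PySem.Dict.get?_eq_none_iff_contains]
        simp [hp]
      have hcontprev : f.contains (p.1 - 1) = true := by
        rw [PySem.Dict.contains_iff_mem_keys, hkeys, ← PySem.Dict.contains_iff_mem_keys]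
        rw [← Bool.not_eq_false, ← PySem.Dict.get?_eq_none_iff_contains]
        simp [hprev]
      constructor
      · rw [PySem.Dict.keys_insert_of_contains]
        · rw [PySem.Dict.keys_modify, PySem.Dict.keys_insert_of_contains _ _ hcontprev, hkeys]
        · rw [PySem.Dict.contains_modify]
          simp [hcontm]
      · intro k w hk
        rw [PySem.Dict.getD_insert, PySem.Dict.getD_modify]
        by_cases hkm : k = p.1
        · subst hkm
          obtain rfl : p.2 = w := Option.some.inj (hp.symm.trans hk)
          rw [if_pos rfl]
          have hcond : ¬ (d.contains (p.1+1) = true ∧ (p.1+1) ∉ t.map (·.1) ∧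
              PySem.Set.inter p.2 (d.getD (p.1+1) PySem.Set.empty) ≠ ([] : PySem.Set Int)) := by
            rintro ⟨hc, hnt, -⟩
            have hmem : (p.1+1) ∈ d.keys := (PySem.Dict.contains_iff_mem_keys d _).mp hc
            have hin : (p.1+1) ∈ p.1 :: t.map (·.1) := by
              by_contra hnot
              exact absurd (hlo _ hmem hnot p.1 (by simp)) (by omega)
            rcases List.mem_cons.mp hin with heq | h
            · omega
            · exact hnt h
          rw [if_neg hcond]
          omega
        · rw [if_neg hkm]
          by_cases hkprev : k = p.1 - 1
          · subst hkprev
            obtain rfl : w = wprev := (Option.some.inj (hprev.symm.trans hk)).symm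
            rw [if_pos rfl]
            have he : p.1 - 1 + 1 = p.1 := by omega
            have hold : f.getD (p.1 - 1) 0 = PySem.Set.len w := by
              rw [hval (p.1 - 1) w hk]
              rw [if_neg]
              · omega
              · rintro ⟨-, hnp, -⟩
                exact hnp (by simp [he])
            have hgd : d.getD (p.1 - 1 + 1) PySem.Set.empty = p.2 := by
              rw [he]; exact PySem.Dict.getD_of_get?_eq_some _ _ hp
            rw [hold, hgd, if_pos]
            · exact ⟨by
                rw [he, ← Bool.not_eq_false, ← PySem.Dict.get?_eq_none_iff_contains]
                simp [hp], by rw [he]; exact hmnott, by rw [hgd] at *; exact hov⟩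
          · rw [if_neg hkprev]
            rw [hval k w hk]
            have hkp : k + 1 ≠ p.1 := by omega
            congr 1
            apply if_congr _ rfl rfl
            simp [List.mem_cons, hkp]
    · simp only [if_neg hov]
      refine ⟨hkeys, fun k w hk => ?_⟩
      rw [hval k w hk]
      by_cases hkp : k + 1 = p.1
      · have hkprev : k = p.1 - 1 := by omega
        obtain rfl : w = wprev := by
          have h2 : d.get? (p.1 - 1) = some w := by rw [← hkprev]; exact hk
          exact (Option.some.inj (hprev.symm.trans h2)).symm
        have hgd : d.getD (k+1) PySem.Set.empty = p.2 := by
          rw [hkp]; exact PySem.Dict.getD_of_get?_eq_some _ _ hp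
        rw [not_not] at hov
        rw [if_neg, if_neg]
        · rintro ⟨-, -, hne⟩; rw [hgd] at hne; exact hne hov
        · rintro ⟨-, hnp, -⟩; exact hnp (by simp [hkp])
      · congr 1
        apply if_congr _ rfl rfl
        simp [List.mem_cons, hkp]


theorem pvFold_inv (d : PySem.Dict Int (PySem.Set Int)) :
    ∀ (L : List (Int × PySem.Set Int)) (f : PySem.Dict Int Int),
    (∀ p ∈ L, d.get? p.1 = some p.2) →
    List.Pairwise (fun a b => a.1 < b.1) L →
    (∀ j ∈ d.keys, j ∉ L.map (·.1) → ∀ i ∈ L.map (·.1), j < i) →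
    pvInv d (L.map (·.1)) f →
    pvInv d [] (L.foldl (pvStepA d) f) := by
  intro L
  induction L with
  | nil => intro f _ _ _ h; simpa using h
  | cons p t ih =>
    intro f hget hpw hlo hinv
    have hlt : ∀ q ∈ t, p.1 < q.1 := fun q hq => (List.pairwise_cons.mp hpw).1 q hq
    simp only [List.foldl_cons]
    apply ih
    · exact fun q hq => hget q (List.mem_cons_of_mem _ hq)
    · exact (List.pairwise_cons.mp hpw).2
    · intro j hj hnj i hi
      obtain ⟨q, hq, rfl⟩ := List.mem_map.mp hi
      by_cases hjp : j = p.1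
      · subst hjp; exact hlt q hq
      · exact hlo j hj (by simp only [List.map_cons, List.mem_cons]; rintro (h | h); exact hjp h; exact hnj h) _ (by simp only [List.map_cons, List.mem_cons]; right; exact hi)
    · exact pvStepA_inv d p t f (hget p (List.mem_cons_self)) hlt (by simpa using hlo) (by simpa using hinv)


theorem pv_main (result : List (Int × List Int)) :
    adjust_week_counts result = adjust_week_counts_alt result := by
  unfold adjust_week_counts adjust_week_counts_alt
  simp only []
  set d := pvDict result with hdd
  have hd : d.keys.Nodup := PySem.Dict.nodup_keys_ofList _
  have hdnd : (d.items.map (fun p => p.1)).Nodup := hd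
  -- final0
  set final0 := d.items.foldl (fun f p => f.insert p.1 (PySem.Set.len p.2)) PySem.Dict.empty with hf0
  have h0items : final0.items = d.items.map (fun p => (p.1, PySem.Set.len p.2)) := by
    rw [hf0, PySem.Dict.items_foldl_insert_fresh d.items (fun p => p.1) (fun p => PySem.Set.len p.2)
      PySem.Dict.empty (fun a _ => PySem.Dict.contains_empty _) hdnd]
    rfl
  have h0keys : final0.keys = d.keys := by
    show final0.items.map (fun p => p.1) = d.items.map (fun p => p.1)
    rw [h0items, List.map_map]
    rfl
  have h0nd : final0.keys.Nodup := by rw [h0keys]; exact hd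
  have h0val : ∀ k w, d.get? k = some w → final0.getD k 0 = PySem.Set.len w := by
    intro k w hk
    have hmem : (k, PySem.Set.len w) ∈ final0.items := by
      rw [h0items]
      exact List.mem_map.mpr ⟨(k, w), PySem.Dict.mem_items_of_get?_eq_some d hk, rfl⟩
    exact PySem.Dict.getD_of_mem_items final0 hmem h0nd 0
  -- sorted list
  set S := PySem.List.sorted d.items (fun p => p.1) with hS
  have hperm : S.Perm d.items := PySem.List.sorted_perm _ _ _
  have hSnd : (S.map (fun p => p.1)).Nodup := ((hperm.map (fun p => p.1)).nodup_iff).mpr hdnd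
  have hpw : List.Pairwise (fun a b : Int × PySem.Set Int => a.1 < b.1) S := by
    have hle : List.Pairwise (fun a b : Int × PySem.Set Int => a.1 ≤ b.1) S :=
      PySem.List.sorted_pairwise d.items (fun p => p.1)
    have hne : List.Pairwise (fun a b : Int × PySem.Set Int => a.1 ≠ b.1) S := by
      rw [← List.pairwise_map (f := fun p : Int × PySem.Set Int => p.1)]
      exact hSnd
    exact (hle.and hne).imp (fun h => lt_of_le_of_ne h.1 h.2)
  have hget : ∀ p ∈ S, d.get? p.1 = some p.2 := by
    intro p hp
    have : p ∈ d.items := (PySem.List.mem_sorted _ _ _ _).mp hp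
    obtain ⟨k, v⟩ := p
    exact PySem.Dict.get?_of_mem_items d this hd
  have hmemS : ∀ j ∈ d.keys, j ∈ S.map (fun p => p.1) := by
    intro j hj
    have : j ∈ d.items.map (fun p => p.1) := hj
    exact (hperm.map (fun p => p.1)).mem_iff.mpr this
  have hinv0 : pvInv d (S.map (fun p => p.1)) final0 := by
    refine ⟨h0keys, fun k w hk => ?_⟩
    rw [h0val k w hk, if_neg]
    · omega
    · rintro ⟨hc, hnp, -⟩
      exact hnp (hmemS _ ((PySem.Dict.contains_iff_mem_keys d _).mp hc))
  have hinvF := pvFold_inv d S final0 hget hpw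
    (fun j hj hnj _ hi => absurd (hmemS j hj) hnj) hinv0
  obtain ⟨hkF, hvF⟩ := hinvF
  -- items of both sides as maps over d.keys
  rw [PySem.Dict.items_eq_map_keys _ (hkF ▸ hd) 0, hkF,
      PySem.Dict.items_eq_map_keys d hd PySem.Set.empty, List.map_map]
  apply List.map_congr_left
  intro k hk
  obtain ⟨w, hw⟩ : ∃ w, d.get? k = some w := by
    cases hgk : d.get? k with
    | none => exact absurd ((PySem.Dict.get?_eq_none_iff_not_mem_keys d k).mp hgk) (by simp [hk])
    | some w => exact ⟨w, rfl⟩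
  have hgd : d.getD k PySem.Set.empty = w := PySem.Dict.getD_of_get?_eq_some _ _ hw
  rw [hvF k w hw]
  simp only [Function.comp, hgd]
  by_cases hc : d.contains (k+1) = true
  · by_cases hov : PySem.Set.inter w (d.getD (k+1) PySem.Set.empty) ≠ ([] : PySem.Set Int)
    · rw [if_pos ⟨hc, by simp, hov⟩]
    · rw [not_not] at hov
      rw [if_neg (by rintro ⟨-, -, h⟩; exact h hov), hov]
      simp [PySem.Set.len]
  · have hempty : d.getD (k+1) PySem.Set.empty = PySem.Set.empty :=
      PySem.Dict.getD_of_not_contains d _ (by simpa using hc)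
    rw [if_neg (by rintro ⟨h, -, -⟩; exact hc h), hempty]
    simp [PySem.Set.inter, PySem.Set.empty, PySem.Set.len]

-- ===== VERDICT (by name: the statement is the Claim_ definition above) =====
theorem adjust_week_counts_spec : Claim_equal_adjust_week_counts := by
  intro result _
  unfold Spec_adjust_week_counts
  exact pv_main result
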